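-- pv_equiv track=rewrite | github.com/BouweCeunen/certbot-kubernetes-secrets-aws | test.py | get_domains_hosted_zone
-- ===== SOURCE A (Python) =====
-- def get_domains_hosted_zone(hosted_zones, domain):
--     domains = domain.split('.')
--     hosted_zone = None
--     for zone in hosted_zones:
--         parsed_zone = zone.split('.')
--         parsed_domain = domain.split('.')
--         while len(parsed_domain) >= 1 and len(parsed_zone) >= 1:
--             if parsed_domain[-1] != parsed_zone[-1]:
--                 break
--             parsed_domain.pop(-1)
--             parsed_zone.pop(-1)
--         if len(parsed_zone) == 0 and len(parsed_domain) <= len(domains):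
--             domains = parsed_domain
--             hosted_zone = zone
--     return (hosted_zone, domains)
-- ===== SOURCE B (Python) =====
-- def get_domains_hosted_zone(hosted_zones, domain):
--     labels = domain.split('.')
--     suffix_index = {tuple(labels[i:]): i for i in range(len(labels))}
--     hosted_zone = None
--     best = len(labels)
--     for zone in hosted_zones:
--         i = suffix_index.get(tuple(zone.split('.')))
--         if i is not None and i <= best:
--             hosted_zone = zone
--             best = i
--     return (hosted_zone, labels[:best])
-- ===== Notes on version B (the rewrite author's own statement) =====
-- stated objective: faster
-- what changed: Replaces the per-zone label-by-label suffix-stripping while-loop with a suffix index built once over the domain's labels (tuple of remaining labels -> remaining-label count), so each zone is handled by a single O(1) dict lookup.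
import Mathlib
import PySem

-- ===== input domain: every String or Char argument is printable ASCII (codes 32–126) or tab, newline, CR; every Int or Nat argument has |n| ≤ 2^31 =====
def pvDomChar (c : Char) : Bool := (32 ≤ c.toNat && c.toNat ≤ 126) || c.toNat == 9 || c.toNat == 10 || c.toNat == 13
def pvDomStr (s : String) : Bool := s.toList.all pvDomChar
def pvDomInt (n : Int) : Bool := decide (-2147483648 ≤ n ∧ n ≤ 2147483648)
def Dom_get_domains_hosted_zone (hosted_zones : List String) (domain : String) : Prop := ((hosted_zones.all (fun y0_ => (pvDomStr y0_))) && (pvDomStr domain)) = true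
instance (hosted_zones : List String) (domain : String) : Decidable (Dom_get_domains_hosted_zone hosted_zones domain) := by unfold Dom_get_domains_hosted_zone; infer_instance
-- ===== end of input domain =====

-- ===== PORT A =====
-- B replaces A's per-zone suffix-stripping loop with a one-time suffix index over the
-- domain's labels plus one dict lookup per zone (objective: faster by constant/mechanism).

-- zone.split('.') / domain.split('.') with the literal nonempty separator "."
def pysplitDot (s : String) : List String := (PySem.Str.split? s ".").getD []

-- the inner while-loop of A: pop matching last labels from both lists
def stripLoop (pd pz : List String) : List String × List String :=
  if h : 1 ≤ pd.length ∧ 1 ≤ pz.length then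
    if pd.getLast? ≠ pz.getLast? then (pd, pz)
    else stripLoop pd.dropLast pz.dropLast
  else (pd, pz)
termination_by pz.length
decreasing_by
  have : pz ≠ [] := by intro hn; simp [hn] at h
  simp [List.length_dropLast]
  omega

-- the body of A's 'for zone in hosted_zones' loop
def stepA (domain : String) (st : Option String × List String) (zone : String) :
    Option String × List String :=
  let parsed_zone := pysplitDot zone
  let parsed_domain := pysplitDot domain
  let p := stripLoop parsed_domain parsed_zone
  if p.2.length = 0 ∧ p.1.length ≤ st.2.length then (some zone, p.1) else st

def get_domains_hosted_zone (hosted_zones : List String) (domain : String) :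
    Option String × List String :=
  let domains := pysplitDot domain
  hosted_zones.foldl (stepA domain) ((none : Option String), domains)

-- ===== PORT B =====
-- the body of B's 'for zone in hosted_zones' loop
def stepB (suffixIndex : PySem.Dict (List String) Nat) (st : Option String × Nat)
    (zone : String) : Option String × Nat :=
  match suffixIndex.get? (pysplitDot zone) with
  | some i => if i ≤ st.2 then (some zone, i) else st
  | none => st

def get_domains_hosted_zone_alt (hosted_zones : List String) (domain : String) :
    Option String × List String :=
  let labels := pysplitDot domain
  let n := labels.length
  let suffixIndex : PySem.Dict (List String) Nat :=
    (List.range n).foldl (fun d i => d.insert (labels.drop i) i) PySem.Dict.empty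
  let st := hosted_zones.foldl (stepB suffixIndex) ((none : Option String), n)
  (st.1, labels.take st.2)

-- ===== PRECONDITION & SPEC =====
def Spec_get_domains_hosted_zone (hosted_zones : List String) (domain : String) (out : Option String × List String) : Prop := out = get_domains_hosted_zone_alt hosted_zones domain
instance (hosted_zones : List String) (domain : String) (out : Option String × List String) : Decidable (Spec_get_domains_hosted_zone hosted_zones domain out) := by unfold Spec_get_domains_hosted_zone; infer_instance

-- ===== CLAIM (what is proved, stated in full; the proofs are below) =====
def Claim_equal_get_domains_hosted_zone : Prop := ∀ (hosted_zones : List String) (domain : String), Dom_get_domains_hosted_zone hosted_zones domain → Spec_get_domains_hosted_zone hosted_zones domain (get_domains_hosted_zone hosted_zones domain)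

-- ===== LEMMAS AND PROOFS =====

-- split always returns a nonempty list (Python s.split('.') is never [])
theorem splitOn_go_ne_nil (sep : List Char) (fuel : Nat) (l cur : List Char)
    (acc : List (List Char)) : PySem.Chars.splitOn.go sep fuel l cur acc ≠ [] := by
  induction fuel generalizing l cur acc with
  | zero => simp [PySem.Chars.splitOn.go]
  | succ fuel ih =>
    cases l with
    | nil => simp [PySem.Chars.splitOn.go]
    | cons c rest =>
      rw [PySem.Chars.splitOn.go]
      split
      · exact ih _ _ _
      · exact ih _ _ _

theorem pysplitDot_ne_nil (s : String) : pysplitDot s ≠ [] := by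
  have h := splitOn_go_ne_nil ".".toList (s.toList.length + 1) s.toList [] []
  simp only [pysplitDot, PySem.Str.split?, PySem.Chars.split?, PySem.Chars.splitOn]
  simp only [List.isEmpty]
  simpa using h

-- characterization of A's inner while loop
theorem take_dropLast_eq (l : List String) (m : Nat) (hm : m ≤ l.length - 1) :
    l.dropLast.take m = l.take m := by
  rw [List.dropLast_eq_take, List.take_take, min_eq_left hm]

theorem stripLoop_of_suffix (pd pz : List String) (h : pz <:+ pd) :
    stripLoop pd pz = (pd.take (pd.length - pz.length), []) := by
  fun_induction stripLoop pd pz with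
  | case1 pd pz hg hne =>
    exfalso
    obtain ⟨t, rfl⟩ := h
    have hpz : pz ≠ [] := by intro hn; simp [hn] at hg
    exact hne (List.getLast?_append_of_ne_nil t hpz)
  | case2 pd pz hg hne ih =>
    have hpz : pz ≠ [] := by intro hn; simp [hn] at hg
    obtain ⟨t, rfl⟩ := h
    have h1 : 1 ≤ pz.length := hg.2
    have hsuf : pz.dropLast <:+ (t ++ pz).dropLast := by
      rw [List.dropLast_append_of_ne_nil hpz]; exact ⟨t, rfl⟩
    rw [ih hsuf]
    have harith : (t ++ pz).dropLast.length - pz.dropLast.length = t.length := by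
      simp only [List.length_dropLast, List.length_append]; omega
    have harith2 : (t ++ pz).length - pz.length = t.length := by simp
    rw [harith, harith2, take_dropLast_eq]
    simp only [List.length_append]; omega
  | case3 pd pz hg =>
    have hpz : pz = [] := by
      by_contra hne
      obtain ⟨t, rfl⟩ := h
      have h1 : 1 ≤ pz.length := List.length_pos_of_ne_nil hne
      exact hg ⟨by simp; omega, h1⟩
    subst hpz
    simp

theorem stripLoop_of_not_suffix (pd pz : List String) (h : ¬ pz <:+ pd) :
    (stripLoop pd pz).2 ≠ [] := by
  fun_induction stripLoop pd pz with
  | case1 pd pz hg hne =>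
    intro hn; simp at hn; simp [hn] at hg
  | case2 pd pz hg hne ih =>
    apply ih
    intro hsuf
    apply h
    have hpz : pz ≠ [] := by intro hn; simp [hn] at hg
    have hpd : pd ≠ [] := by intro hn; simp [hn] at hg
    have hlast : pd.getLast? = pz.getLast? := by by_contra hcon; exact hne hcon
    have ha : pd.getLast hpd = pz.getLast hpz := by
      have h1 := List.getLast?_eq_some_getLast hpd
      have h2 := List.getLast?_eq_some_getLast hpz
      rw [h1, h2] at hlast
      exact Option.some.inj hlast
    obtain ⟨t, ht⟩ := hsuf
    refine ⟨t, ?_⟩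
    calc t ++ pz = t ++ (pz.dropLast ++ [pz.getLast hpz]) := by
            rw [List.dropLast_concat_getLast hpz]
      _ = (t ++ pz.dropLast) ++ [pz.getLast hpz] := by rw [List.append_assoc]
      _ = pd.dropLast ++ [pd.getLast hpd] := by rw [ht, ha]
      _ = pd := List.dropLast_concat_getLast hpd
  | case3 pd pz hg =>
    intro hn; simp at hn
    subst hn; exact h List.nil_suffix

-- the suffix index of B: its items, keys, and lookup characterization
theorem suffixIndex_items (labels : List String) :
    ((List.range labels.length).foldl (fun d i => d.insert (labels.drop i) i)
        PySem.Dict.empty).items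
      = (List.range labels.length).map (fun i => (labels.drop i, i)) := by
  have hnd : ((List.range labels.length).map (fun i => labels.drop i)).Nodup := by
    refine List.Nodup.map_on ?_ (List.nodup_range)
    intro x hx y hy hxy
    have hx' := List.mem_range.mp hx
    have hy' := List.mem_range.mp hy
    have := congrArg List.length hxy
    simp only [List.length_drop] at this
    omega
  have h := PySem.Dict.items_foldl_insert_fresh (List.range labels.length)
    (fun i => labels.drop i) (fun i => i) PySem.Dict.empty
    (by intro a _; rfl) hnd
  simpa using h

theorem suffixIndex_keys_nodup (labels : List String) :
    ((List.range labels.length).foldl (fun d i => d.insert (labels.drop i) i)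
        PySem.Dict.empty).keys.Nodup := by
  have h : ((List.range labels.length).foldl (fun d i => d.insert (labels.drop i) i)
      PySem.Dict.empty).keys
      = (List.range labels.length).map (fun i => labels.drop i) := by
    simp only [PySem.Dict.keys, suffixIndex_items, List.map_map]
    rfl
  rw [h]
  refine List.Nodup.map_on ?_ (List.nodup_range)
  intro x hx y hy hxy
  have hx' := List.mem_range.mp hx
  have hy' := List.mem_range.mp hy
  have := congrArg List.length hxy
  simp only [List.length_drop] at this
  omega

theorem suffixIndex_get?_eq_some (labels : List String) (key : List String) (i : Nat) :
    ((List.range labels.length).foldl (fun d i => d.insert (labels.drop i) i)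
        PySem.Dict.empty).get? key = some i ↔ i < labels.length ∧ labels.drop i = key := by
  rw [PySem.Dict.get?_eq_some_iff_mem_items _ _ _ (suffixIndex_keys_nodup labels),
    suffixIndex_items]
  simp only [List.mem_map, List.mem_range, Prod.mk.injEq]
  constructor
  · rintro ⟨a, ha, hk, rfl⟩; exact ⟨ha, hk⟩
  · rintro ⟨hi, hk⟩; exact ⟨i, hi, hk, rfl⟩

theorem suffixIndex_get?_eq_none (labels : List String) (key : List String) :
    ((List.range labels.length).foldl (fun d i => d.insert (labels.drop i) i)
        PySem.Dict.empty).get? key = none ↔ ∀ i < labels.length, labels.drop i ≠ key := by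
  rw [PySem.Dict.get?_eq_none_iff_not_mem_keys]
  have h : ((List.range labels.length).foldl (fun d i => d.insert (labels.drop i) i)
      PySem.Dict.empty).keys
      = (List.range labels.length).map (fun i => labels.drop i) := by
    simp only [PySem.Dict.keys, suffixIndex_items, List.map_map]
    rfl
  rw [h]
  simp only [List.mem_map, List.mem_range, not_exists]
  constructor
  · intro hni i hi hk; exact hni i ⟨hi, hk⟩
  · rintro hni i ⟨hi, hk⟩; exact hni i hi hk

-- the two folds agree step by step
theorem fold_agree (domain : String) (zs : List String)
    (stA : Option String × List String) (stB : Option String × Nat)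
    (h1 : stA.1 = stB.1) (h2 : stA.2 = (pysplitDot domain).take stB.2)
    (h3 : stB.2 ≤ (pysplitDot domain).length) :
    zs.foldl (stepA domain) stA =
      (((zs.foldl (stepB ((List.range (pysplitDot domain).length).foldl
          (fun d i => d.insert ((pysplitDot domain).drop i) i) PySem.Dict.empty)) stB)).1,
       (pysplitDot domain).take ((zs.foldl (stepB ((List.range (pysplitDot domain).length).foldl
          (fun d i => d.insert ((pysplitDot domain).drop i) i) PySem.Dict.empty)) stB)).2) := by
  induction zs generalizing stA stB with
  | nil =>
    simp only [List.foldl_nil]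
    exact Prod.ext h1 h2
  | cons z zs ih =>
    simp only [List.foldl_cons]
    set labels := pysplitDot domain with hlab
    set D := (List.range labels.length).foldl
      (fun d i => d.insert (labels.drop i) i) PySem.Dict.empty with hD
    cases hg : D.get? (pysplitDot z) with
    | none =>
      have hstepB : stepB D stB z = stB := by
        simp only [stepB, hg]
      have hni := (suffixIndex_get?_eq_none labels (pysplitDot z)).mp hg
      have hnsuf : ¬ pysplitDot z <:+ labels := by
        intro hsuf
        have hlen := hsuf.length_le
        have hz1 : 1 ≤ (pysplitDot z).length :=
          List.length_pos_of_ne_nil (pysplitDot_ne_nil z)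
        have heq := List.suffix_iff_eq_drop.mp hsuf
        exact hni (labels.length - (pysplitDot z).length) (by omega) heq.symm
      have hA2 := stripLoop_of_not_suffix labels (pysplitDot z) hnsuf
      have hstepA : stepA domain stA z = stA := by
        simp only [stepA, ← hlab]
        rw [if_neg]
        intro hcon
        exact hA2 (List.length_eq_zero_iff.mp hcon.1)
      rw [hstepA, hstepB]
      exact ih stA stB h1 h2 h3
    | some i =>
      obtain ⟨hi, hk⟩ := (suffixIndex_get?_eq_some labels (pysplitDot z) i).mp hg
      have hsuf : pysplitDot z <:+ labels := by
        rw [← hk]; exact List.drop_suffix i labels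
      have hstrip : stripLoop labels (pysplitDot z) = (labels.take i, []) := by
        rw [stripLoop_of_suffix labels (pysplitDot z) hsuf, ← hk]
        simp only [List.length_drop]
        congr 2
        omega
      have hlenA : stA.2.length = stB.2 := by
        rw [h2, List.length_take]; omega
      have hlentake : (labels.take i).length = i := by
        rw [List.length_take]; omega
      by_cases hle : i ≤ stB.2
      · have hstepA : stepA domain stA z = (some z, labels.take i) := by
          simp only [stepA, ← hlab, hstrip]
          rw [if_pos]
          exact ⟨rfl, by rw [hlentake, hlenA]; exact hle⟩
        have hstepB : stepB D stB z = (some z, i) := by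
          simp only [stepB, hg, if_pos hle]
        rw [hstepA, hstepB]
        exact ih _ _ rfl rfl (le_of_lt hi)
      · have hstepA : stepA domain stA z = stA := by
          simp only [stepA, ← hlab, hstrip]
          rw [if_neg]
          intro hcon
          rw [hlentake, hlenA] at hcon
          exact hle hcon.2
        have hstepB : stepB D stB z = stB := by
          simp only [stepB, hg, if_neg hle]
        rw [hstepA, hstepB]
        exact ih stA stB h1 h2 h3

-- ===== VERDICT (by name: the statement is the Claim_ definition above) =====
theorem get_domains_hosted_zone_spec : Claim_equal_get_domains_hosted_zone := by
  intro hosted_zones domain _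
  unfold Spec_get_domains_hosted_zone get_domains_hosted_zone get_domains_hosted_zone_alt
  simpa using fold_agree domain hosted_zones (none, pysplitDot domain)
    (none, (pysplitDot domain).length) rfl (by simp) le_rfl
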